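-- pv_equiv track=rewrite | github.com/antenore/voynich-toolkit | src/voynich_toolkit/deep_yl_analysis.py | compute_positional_profile
-- ===== SOURCE A (Python) =====
-- from collections import Counter, defaultdict
--
-- def compute_positional_profile(words, char):
--     """Compute positional profile for an EVA character."""
--     counts = Counter()
--     for w in words:
--         for i, c in enumerate(w):
--             if c == char:
--                 if len(w) == 1:
--                     counts['isolated'] += 1
--                 elif i == 0:
--                     counts['initial'] += 1
--                 elif i == len(w) - 1:
--                     counts['final'] += 1
--                 else:
--                     counts['medial'] += 1
--     total = sum(counts.values())
--     return {pos: counts.get(pos, 0) for pos in ['initial', 'medial', 'final']}, total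
-- ===== SOURCE B (Python) =====
-- def compute_positional_profile(words, char):
--     """Compute positional profile for an EVA character."""
--     initial = medial = final = 0
--     total = 0
--     for w in words:
--         total += sum(c == char for c in w)
--         if len(w) < 2:
--             continue
--         if w[0] == char:
--             initial += 1
--         if w[-1] == char:
--             final += 1
--         medial += sum(c == char for c in w[1:-1])
--     return {'initial': initial, 'medial': medial, 'final': final}, total
-- ===== Notes on version B (the rewrite author's own statement) =====
-- stated objective: simpler
-- what changed: Replaces A's Counter-and-dict bookkeeping over enumerate(word) with four plain integer accumulators updated by boundary tests (first/last char) plus interior and whole-word match counts, skipping short words.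
import Mathlib
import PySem

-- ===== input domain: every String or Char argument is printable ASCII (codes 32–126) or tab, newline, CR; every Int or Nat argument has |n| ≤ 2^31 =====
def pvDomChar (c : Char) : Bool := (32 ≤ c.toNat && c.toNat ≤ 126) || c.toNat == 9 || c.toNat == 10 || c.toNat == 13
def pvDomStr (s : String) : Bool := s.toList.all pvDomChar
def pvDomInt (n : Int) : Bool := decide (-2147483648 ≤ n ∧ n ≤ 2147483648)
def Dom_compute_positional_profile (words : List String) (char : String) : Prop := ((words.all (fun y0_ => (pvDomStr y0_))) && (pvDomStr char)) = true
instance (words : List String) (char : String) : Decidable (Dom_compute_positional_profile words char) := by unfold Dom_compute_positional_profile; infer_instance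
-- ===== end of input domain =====

-- B replaces A's Counter-driven enumerate-and-classify loop by direct boundary tests
-- (first/last char) plus interior and whole-word match counts — simpler, no dict bookkeeping.

-- ===== PORT A =====
def compute_positional_profile (words : List String) (char : String) : (List (String × Int)) × Int :=
  let counts : PySem.Dict String Int :=
    words.foldl (fun counts w =>
      (PySem.List.enumerate w.toList 0).foldl (fun counts p =>
        if String.singleton p.2 == char then
          if PySem.Str.len w == 1 then counts.insert "isolated" (counts.getD "isolated" 0 + 1)
          else if p.1 == 0 then counts.insert "initial" (counts.getD "initial" 0 + 1)
          else if p.1 == PySem.Str.len w - 1 then counts.insert "final" (counts.getD "final" 0 + 1)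
          else counts.insert "medial" (counts.getD "medial" 0 + 1)
        else counts) counts) PySem.Dict.empty
  let total := counts.values.sum
  (["initial", "medial", "final"].map (fun pos => (pos, counts.getD pos 0)), total)

-- ===== PORT B =====
def compute_positional_profile_alt (words : List String) (char : String) : (List (String × Int)) × Int :=
  let r : Int × Int × Int × Int :=
    words.foldl (fun s w =>
      let total := s.2.2.2 + (w.toList.map (fun c => if String.singleton c == char then (1 : Int) else 0)).sum
      if PySem.Str.len w < 2 then (s.1, s.2.1, s.2.2.1, total)
      else
        let initial := s.1 + (if String.singleton (PySem.List.pyGetD w.toList 0 ' ') == char then 1 else 0)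
        let final := s.2.2.1 + (if String.singleton (PySem.List.pyGetD w.toList (-1) ' ') == char then 1 else 0)
        let medial := s.2.1 + ((PySem.List.slice w.toList (some 1) (some (-1))).map
            (fun c => if String.singleton c == char then (1 : Int) else 0)).sum
        (initial, medial, final, total)) (0, 0, 0, 0)
  ([("initial", r.1), ("medial", r.2.1), ("final", r.2.2.1)], r.2.2.2)

-- ===== PRECONDITION & SPEC =====
def Spec_compute_positional_profile (words : List String) (char : String) (out : (List (String × Int)) × Int) : Prop := out = compute_positional_profile_alt words char
instance (words : List String) (char : String) (out : (List (String × Int)) × Int) : Decidable (Spec_compute_positional_profile words char out) := by unfold Spec_compute_positional_profile; infer_instance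

-- ===== CLAIM (what is proved, stated in full; the proofs are below) =====
def Claim_equal_compute_positional_profile : Prop := ∀ (words : List String) (char : String), Dom_compute_positional_profile words char → Spec_compute_positional_profile words char (compute_positional_profile words char)

-- ===== LEMMAS AND PROOFS =====

-- the match predicate both ports test
def pvMc (char : String) (c : Char) : Bool := String.singleton c == char

-- the classification A applies to a matching (index, char) pair of a word of length n
def pvCls (n : Nat) (i : Int) : String :=
  if ((n : Int) == 1) then "isolated"
  else if i == 0 then "initial"
  else if i == (n : Int) - 1 then "final" else "medial"

theorem pvCls_zero (n : Nat) (h : 2 ≤ n) : pvCls n 0 = "initial" := by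
  unfold pvCls
  rw [if_neg (by simp; omega)]
  simp

theorem pvCls_last (n : Nat) (i : Int) (h : 2 ≤ n) (hi : i = (n : Int) - 1) :
    pvCls n i = "final" := by
  unfold pvCls
  rw [if_neg (by simp; omega), if_neg (by simp [hi]; omega), if_pos (by simp [hi])]

theorem pvCls_mid (n : Nat) (i : Int) (h : 2 ≤ n) (h0 : i ≠ 0) (hl : i ≠ (n : Int) - 1) :
    pvCls n i = "medial" := by
  unfold pvCls
  rw [if_neg (by simp; omega), if_neg (by simp [h0]), if_neg (by simp [hl])]

-- the list of Counter keys A's inner loop inserts for one word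
def pvKeys (char : String) (w : List Char) : List String :=
  ((PySem.List.enumerate w 0).filter (fun p => pvMc char p.2)).map (fun p => pvCls w.length p.1)

-- the same keys for a SEGMENT of the word starting at offset s
def pvG (char : String) (n : Nat) (l : List Char) (s : Int) : List String :=
  ((PySem.List.enumerate l s).filter (fun p => pvMc char p.2)).map (fun p => pvCls n p.1)

theorem pvKeys_eq_pvG (char : String) (w : List Char) : pvKeys char w = pvG char w.length w 0 := rfl

theorem pvG_append (char : String) (n : Nat) (x y : List Char) (s : Int) :
    pvG char n (x ++ y) s = pvG char n x s ++ pvG char n y (s + x.length) := by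
  simp [pvG, PySem.List.enumerate_append, List.filter_append]

theorem pvG_single (char : String) (n : Nat) (c : Char) (s : Int) :
    pvG char n [c] s = if pvMc char c then [pvCls n s] else [] := by
  cases h : pvMc char c <;> simp [pvG, PySem.List.enumerate, h]

theorem pvFilterEnumLen (char : String) (w : List Char) (s : Int) :
    ((PySem.List.enumerate w s).filter (fun p => pvMc char p.2)).length = w.countP (pvMc char) := by
  conv_rhs => rw [← PySem.List.map_snd_enumerate w s]
  rw [List.countP_map, List.countP_eq_length_filter]
  rfl

theorem pvKeys_length (char : String) (w : List Char) :
    (pvKeys char w).length = w.countP (pvMc char) := by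
  rw [pvKeys, List.length_map, pvFilterEnumLen]

theorem pvKeys_nil (char : String) : pvKeys char [] = [] := rfl

theorem pvKeys_single (char : String) (c : Char) :
    pvKeys char [c] = if pvMc char c then ["isolated"] else [] := by
  cases h : pvMc char c <;> simp [pvKeys, PySem.List.enumerate, h, pvCls]

-- interior segment: every index 1..n-2 classifies as "medial"
theorem pvG_interior (char : String) (mid : List Char) :
    pvG char (mid.length + 2) mid 1 = List.replicate (mid.countP (pvMc char)) "medial" := by
  have hmem : ∀ p ∈ ((PySem.List.enumerate mid 1).filter (fun p => pvMc char p.2)),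
      pvCls (mid.length + 2) p.1 = "medial" := by
    intro p hp
    have hp' := List.mem_of_mem_filter hp
    rw [PySem.List.mem_enumerate_iff] at hp'
    obtain ⟨k, hk, rfl⟩ := hp'
    exact pvCls_mid _ _ (by omega) (by simp; omega) (by simp; omega)
  rw [pvG, List.map_congr_left hmem, List.map_const', pvFilterEnumLen]

theorem pvKeys_long (char : String) (c0 cl : Char) (mid : List Char) :
    pvKeys char (c0 :: (mid ++ [cl])) =
      (if pvMc char c0 then ["initial"] else []) ++
      (List.replicate (mid.countP (pvMc char)) "medial" ++
      (if pvMc char cl then ["final"] else [])) := by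
  have hn : (c0 :: (mid ++ [cl])).length = mid.length + 2 := by simp
  rw [pvKeys_eq_pvG, hn, show c0 :: (mid ++ [cl]) = [c0] ++ (mid ++ [cl]) from by simp,
      pvG_append, pvG_append, pvG_single]
  have h1 : (0 : Int) + (([c0] : List Char).length : Int) = 1 := by simp
  rw [h1, pvG_interior, pvG_single, pvCls_zero _ (by omega),
      pvCls_last (mid.length + 2) (1 + (mid.length : Int)) (by omega) (by push_cast; ring)]

-- A's Counter after the whole double loop is Counter(all keys, in order)
theorem pvCounts_eq_counter (words : List String) (char : String) :
    words.foldl (fun counts w =>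
      (PySem.List.enumerate w.toList 0).foldl (fun counts p =>
        if String.singleton p.2 == char then
          if PySem.Str.len w == 1 then counts.insert "isolated" (counts.getD "isolated" 0 + 1)
          else if p.1 == 0 then counts.insert "initial" (counts.getD "initial" 0 + 1)
          else if p.1 == PySem.Str.len w - 1 then counts.insert "final" (counts.getD "final" 0 + 1)
          else counts.insert "medial" (counts.getD "medial" 0 + 1)
        else counts) counts) PySem.Dict.empty
    = PySem.Dict.counter (words.flatMap (fun w => pvKeys char w.toList)) := by
  rw [← PySem.Dict.foldl_insert_getD_add_one_eq_counter, List.foldl_flatMap]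
  apply PySem.List.foldl_congr_mem
  intro d w _
  have hlen : PySem.Str.len w = (w.toList.length : Int) := by simp [PySem.Str.len]
  simp only [hlen]
  have h1 := PySem.List.foldl_congr_mem
    (l := PySem.List.enumerate w.toList 0) (init := d)
    (f := fun counts (p : Int × Char) =>
      if String.singleton p.2 == char then
        if ((w.toList.length : Int) == 1) then counts.insert "isolated" (counts.getD "isolated" 0 + 1)
        else if p.1 == 0 then counts.insert "initial" (counts.getD "initial" 0 + 1)
        else if p.1 == (w.toList.length : Int) - 1 then counts.insert "final" (counts.getD "final" 0 + 1)
        else counts.insert "medial" (counts.getD "medial" 0 + 1)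
      else counts)
    (g := fun counts (p : Int × Char) =>
      if pvMc char p.2
      then counts.insert (pvCls w.toList.length p.1) (counts.getD (pvCls w.toList.length p.1) 0 + 1)
      else counts)
    (by
      intro acc p _
      simp only [pvMc, pvCls]
      split_ifs <;> rfl)
  have h2 := PySem.List.foldl_if_eq_foldl_filter
    (fun p : Int × Char => pvMc char p.2)
    (fun counts (p : Int × Char) =>
      counts.insert (pvCls w.toList.length p.1) (counts.getD (pvCls w.toList.length p.1) 0 + 1))
    (PySem.List.enumerate w.toList 0) d
  rw [h1, h2, pvKeys, List.foldl_map]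

-- a list-sum of Nat casts is the cast of the Nat sum
theorem pvSum_cast (l : List String) (f : String → Nat) :
    (l.map (fun k => ((f k : Nat) : Int))).sum = ((l.map f).sum : Int) := by
  induction l with
  | nil => simp
  | cons x xs ih => simp [ih]

-- values of a counter sum to the list length
theorem pvSum_values_counter (xs : List String) :
    (PySem.Dict.counter xs).values.sum = (xs.length : Int) := by
  have hv : (PySem.Dict.counter xs).values
      = (PySem.Set.ofList xs).map (fun k => ((xs.count k : Nat) : Int)) := by
    show ((PySem.Dict.counter xs).items).map (·.2) = _
    rw [PySem.Dict.items_counter, List.map_map]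
    rfl
  have hperm : (PySem.Set.ofList xs).Perm xs.dedup := by
    rw [List.perm_ext_iff_of_nodup (PySem.Set.nodup_ofList xs) xs.nodup_dedup]
    intro a; rw [PySem.Set.mem_ofList, List.mem_dedup]
  rw [hv, pvSum_cast, (hperm.map (fun k => xs.count k)).sum_eq,
      List.sum_map_count_dedup_eq_length]

-- B's per-word step, expressed through pvKeys
theorem pvStepB (char : String) (w : String) (a b c t : Int) :
    (let total := t + (w.toList.map (fun c => if String.singleton c == char then (1 : Int) else 0)).sum
     if PySem.Str.len w < 2 then (a, b, c, total)
     else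
       let initial := a + (if String.singleton (PySem.List.pyGetD w.toList 0 ' ') == char then 1 else 0)
       let final := c + (if String.singleton (PySem.List.pyGetD w.toList (-1) ' ') == char then 1 else 0)
       let medial := b + ((PySem.List.slice w.toList (some 1) (some (-1))).map
           (fun c => if String.singleton c == char then (1 : Int) else 0)).sum
       (initial, medial, final, total))
    = (a + ((pvKeys char w.toList).count "initial" : Int),
       b + ((pvKeys char w.toList).count "medial" : Int),
       c + ((pvKeys char w.toList).count "final" : Int),
       t + ((pvKeys char w.toList).length : Int)) := by
  have hlen : PySem.Str.len w = (w.toList.length : Int) := by simp [PySem.Str.len]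
  have hsum : ∀ l : List Char,
      (l.map (fun c => if String.singleton c == char then (1 : Int) else 0)).sum
      = (l.countP (pvMc char) : Int) := by
    intro l
    exact PySem.List.sum_map_ite_one_zero (pvMc char) l
  simp only [hlen, hsum, pvKeys_length]
  rcases hw : w.toList with _ | ⟨c0, rest⟩
  · simp [pvKeys_nil]
  rcases List.eq_nil_or_concat rest with rfl | ⟨mid, cl, rfl⟩
  · -- length-1 word
    rw [if_pos (by norm_num)]
    rw [pvKeys_single]
    cases h : pvMc char c0 <;> simp [h]
  · -- length ≥ 2 word
    simp only [List.concat_eq_append]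
    rw [if_neg (by simp [List.length_append])]
    have hget0 : PySem.List.pyGetD (c0 :: (mid ++ [cl])) 0 ' ' = c0 :=
      PySem.List.pyGetD_zero_cons c0 _ ' '
    have hgetl : PySem.List.pyGetD (c0 :: (mid ++ [cl])) (-1) ' ' = cl := by
      rw [show c0 :: (mid ++ [cl]) = (c0 :: mid) ++ [cl] from by simp]
      exact PySem.List.pyGetD_neg_one_append_singleton _ cl ' '
    have hslice : PySem.List.slice (c0 :: (mid ++ [cl])) (some 1) (some (-1)) = mid := by
      simp [PySem.List.slice]
    rw [hget0, hgetl, hslice, pvKeys_long]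
    cases h0 : pvMc char c0 <;> cases hl : pvMc char cl <;>
      simp only [pvMc] at h0 hl <;>
      simp [h0, hl, List.count_append, List.count_replicate,
        List.countP_append, pvMc]

-- B's fold, unrolled to flatMap counts
theorem pvFoldB (char : String) (words : List String) (a b c t : Int) :
    words.foldl (fun s w =>
      let total := s.2.2.2 + (w.toList.map (fun c => if String.singleton c == char then (1 : Int) else 0)).sum
      if PySem.Str.len w < 2 then (s.1, s.2.1, s.2.2.1, total)
      else
        let initial := s.1 + (if String.singleton (PySem.List.pyGetD w.toList 0 ' ') == char then 1 else 0)
        let final := s.2.2.1 + (if String.singleton (PySem.List.pyGetD w.toList (-1) ' ') == char then 1 else 0)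
        let medial := s.2.1 + ((PySem.List.slice w.toList (some 1) (some (-1))).map
            (fun c => if String.singleton c == char then (1 : Int) else 0)).sum
        (initial, medial, final, total)) (a, b, c, t)
    = (a + ((words.flatMap (fun w => pvKeys char w.toList)).count "initial" : Int),
       b + ((words.flatMap (fun w => pvKeys char w.toList)).count "medial" : Int),
       c + ((words.flatMap (fun w => pvKeys char w.toList)).count "final" : Int),
       t + ((words.flatMap (fun w => pvKeys char w.toList)).length : Int)) := by
  induction words generalizing a b c t with
  | nil => simp
  | cons w ws ih =>
    rw [List.foldl_cons, pvStepB char w a b c t, ih]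
    simp only [List.flatMap_cons, List.count_append, List.length_append]
    refine Prod.ext (by push_cast; ring) (Prod.ext (by push_cast; ring)
      (Prod.ext (by push_cast; ring) (by push_cast; ring)))

-- ===== VERDICT (by name: the statement is the Claim_ definition above) =====
theorem compute_positional_profile_spec : Claim_equal_compute_positional_profile := by
  intro words char _
  unfold Spec_compute_positional_profile compute_positional_profile compute_positional_profile_alt
  rw [pvCounts_eq_counter words char, pvFoldB char words 0 0 0 0]
  simp [pvSum_values_counter, PySem.Dict.getD_counter]
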